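-- pv_equiv track=rewrite | github.com/rehpotsirhc/Fall15-MultiAgent-Auctions-MultiUnitVickrey | multi-unit-vickrey.py | bidderIndexToBidderTypeIndex
-- ===== SOURCE A (Python) =====
-- def bidderIndexToBidderTypeIndex(bidderIndex):
--
--     lastSum = 0
--     sum = 0
--     for i in range(0, len(bidderTypes)):
--         sum += bidderTypes[i][0]
--
--         if bidderIndex >= lastSum and bidderIndex < sum:
--             return bidderTypes[i][1]
--
--         lastSum = sum
--
-- bidderTypes = [(1, 'Random'), (1, 'Slow'), (2, 'High')]
-- ===== SOURCE B (Python) =====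
-- bidderTypes = [(1, 'Random'), (1, 'Slow'), (2, 'High')]
--
-- _flat = [name for count, name in bidderTypes for _ in range(count)]
--
-- def bidderIndexToBidderTypeIndex(bidderIndex):
--     if 0 <= bidderIndex < len(_flat):
--         return _flat[bidderIndex]
-- ===== Notes on version B (the rewrite author's own statement) =====
-- stated objective: simpler
-- what changed: Replaces the cumulative-sum scan over bidderTypes with a flat lookup table built once by expanding each (count, name) pair, so the function is a single bounds-checked index.
import Mathlib
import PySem

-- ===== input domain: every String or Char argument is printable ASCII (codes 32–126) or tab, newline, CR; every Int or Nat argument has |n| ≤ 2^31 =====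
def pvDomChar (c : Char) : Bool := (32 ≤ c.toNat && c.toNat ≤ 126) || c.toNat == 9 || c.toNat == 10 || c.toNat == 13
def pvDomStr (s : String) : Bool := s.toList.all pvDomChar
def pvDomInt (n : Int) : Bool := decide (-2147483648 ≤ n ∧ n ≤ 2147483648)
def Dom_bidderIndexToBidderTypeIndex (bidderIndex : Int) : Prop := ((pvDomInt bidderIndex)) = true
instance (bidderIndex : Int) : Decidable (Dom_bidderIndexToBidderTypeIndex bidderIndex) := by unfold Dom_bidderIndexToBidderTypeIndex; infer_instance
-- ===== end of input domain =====

-- B replaces A's cumulative-sum scan with a bounds-checked lookup in a precomputed flat table (objective: simpler).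

-- ===== PORT A =====
def bidderTypesA : List (Int × String) := [(1, "Random"), (1, "Slow"), (2, "High")]

-- A's loop over range(len(bidderTypes)) with lastSum/sum accumulators and early return
def pvALoop (bidderIndex : Int) : List (Int × String) → Int → Int → Option String
  | [], _, _ => none
  | (c, n) :: rest, lastSum, sum =>
    let sum' := sum + c
    if bidderIndex ≥ lastSum ∧ bidderIndex < sum' then some n
    else pvALoop bidderIndex rest sum' sum'

def bidderIndexToBidderTypeIndex (bidderIndex : Int) : Option String :=
  pvALoop bidderIndex bidderTypesA 0 0

-- ===== PORT B =====
def bidderTypesB : List (Int × String) := [(1, "Random"), (1, "Slow"), (2, "High")]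

-- flat table: each name repeated count times
def pvFlat : List String := bidderTypesB.flatMap (fun p => List.replicate p.1.toNat p.2)

def bidderIndexToBidderTypeIndex_alt (bidderIndex : Int) : Option String :=
  if 0 ≤ bidderIndex ∧ bidderIndex < (pvFlat.length : Int) then
    PySem.List.pyGet? pvFlat bidderIndex
  else none

-- ===== PRECONDITION & SPEC =====
def Spec_bidderIndexToBidderTypeIndex (bidderIndex : Int) (out : Option String) : Prop := out = bidderIndexToBidderTypeIndex_alt bidderIndex
instance (bidderIndex : Int) (out : Option String) : Decidable (Spec_bidderIndexToBidderTypeIndex bidderIndex out) := by unfold Spec_bidderIndexToBidderTypeIndex; infer_instance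

-- ===== CLAIM (what is proved, stated in full; the proofs are below) =====
def Claim_equal_bidderIndexToBidderTypeIndex : Prop := ∀ (bidderIndex : Int), Dom_bidderIndexToBidderTypeIndex bidderIndex → Spec_bidderIndexToBidderTypeIndex bidderIndex (bidderIndexToBidderTypeIndex bidderIndex)

-- ===== LEMMAS AND PROOFS =====

-- ===== VERDICT (by name: the statement is the Claim_ definition above) =====
theorem bidderIndexToBidderTypeIndex_spec : Claim_equal_bidderIndexToBidderTypeIndex := by
  intro i _
  unfold Spec_bidderIndexToBidderTypeIndex bidderIndexToBidderTypeIndex bidderIndexToBidderTypeIndex_alt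
  by_cases h : 0 ≤ i ∧ i < 4
  · obtain ⟨h1, h2⟩ := h
    interval_cases i <;> decide
  · simp only [bidderTypesA, bidderTypesB, pvALoop, pvFlat, List.flatMap]
    norm_num [List.flatten, List.replicate]
    split_ifs <;> first | rfl | omega
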